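-- pv_equiv track=rewrite | github.com/dexter2406/course_ics_analysis | cal_filter.py | extract_props
-- ===== SOURCE A (Python) =====
-- def unfold_lines(text: str) -> list[str]:
--     """Merge RFC 5545 folded continuation lines."""
--     result = []
--     for raw in text.splitlines():
--         if raw[:1] in (" ", "\t") and result:
--             result[-1] += raw[1:]
--         else:
--             result.append(raw)
--     return result
--
-- def extract_props(vevent_text: str) -> dict[str, str]:
--     """
--     Return a key→value dict for all properties in a VEVENT block.
--     Handles folded lines and ;PARAM=VALUE key variants.
--     First occurrence of each key wins (important for DTSTART).
--     """
--     props: dict[str, str] = {}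
--     for line in unfold_lines(vevent_text):
--         if ":" not in line:
--             continue
--         key_part, _, value = line.partition(":")
--         key = key_part.split(";")[0].strip().upper()
--         if key not in props:
--             props[key] = value.strip()
--     return props
-- ===== SOURCE B (Python) =====
-- def extract_props(vevent_text: str) -> dict[str, str]:
--     """Single streaming pass: unfold + parse fused, no intermediate line list."""
--     props: dict[str, str] = {}
--     buf = None
--
--     def flush(line):
--         i = line.find(":")
--         if i < 0:
--             return
--         key = line[:i].split(";")[0].strip().upper()
--         if key not in props:
--             props[key] = line[i + 1:].strip()
--
--     for raw in vevent_text.splitlines():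
--         if raw[:1] in (" ", "\t") and buf is not None:
--             buf += raw[1:]
--         else:
--             if buf is not None:
--                 flush(buf)
--             buf = raw
--     if buf is not None:
--         flush(buf)
--     return props
-- ===== Notes on version B (the rewrite author's own statement) =====
-- stated objective: alternative
-- what changed: Fuses A's two passes (build the unfolded-line list, then parse it) into one streaming pass over splitlines() that keeps a single logical-line buffer and parses each logical line as it completes, eliminating the intermediate list.
import Mathlib
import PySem

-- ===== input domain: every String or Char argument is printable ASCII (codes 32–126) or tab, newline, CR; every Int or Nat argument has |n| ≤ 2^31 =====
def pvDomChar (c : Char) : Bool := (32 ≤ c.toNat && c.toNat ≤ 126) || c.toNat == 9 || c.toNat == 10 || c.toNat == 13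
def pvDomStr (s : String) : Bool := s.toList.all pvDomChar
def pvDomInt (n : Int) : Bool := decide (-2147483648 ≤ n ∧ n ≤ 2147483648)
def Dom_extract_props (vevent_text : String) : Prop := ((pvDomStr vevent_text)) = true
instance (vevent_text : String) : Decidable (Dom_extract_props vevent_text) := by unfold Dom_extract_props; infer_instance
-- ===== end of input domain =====

-- B fuses A's two passes (unfold_lines, then parse) into one streaming pass over the raw
-- lines with a single logical-line buffer; same return value, no intermediate list.

-- ===== PORT A =====

-- raw[:1] in (" ", "\t")
def pvCont (raw : List Char) : Bool := decide (raw.take 1 = [' ']) || decide (raw.take 1 = ['\t'])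

-- result[-1] += suffix  (append to the last element of a nonempty list; [] stays [])
def pvAppendLast : List (List Char) → List Char → List (List Char)
  | [], _ => []
  | [x], s => [x ++ s]
  | x :: y :: xs, s => x :: pvAppendLast (y :: xs) s

-- body of unfold_lines' for-loop
def pvStepU (result : List (List Char)) (raw : List Char) : List (List Char) :=
  if pvCont raw && !result.isEmpty then pvAppendLast result (raw.drop 1) else result ++ [raw]

def pvUnfold (lines : List (List Char)) : List (List Char) := lines.foldl pvStepU []

-- body of extract_props' for-loop: ':' membership test, partition, key normalisation
def pvStepA (props : PySem.Dict String String) (line : List Char) : PySem.Dict String String :=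
  if PySem.Chars.isIn [':'] line then
    let i := (PySem.Chars.find line [':']).toNat      -- line.partition(":") splits at the first ':'
    let key := String.ofList (PySem.Chars.upper (PySem.Chars.strip
      ((PySem.Chars.splitOn (line.take i) [';']).headD [])))
    if props.contains key then props
    else props.insert key (String.ofList (PySem.Chars.strip (line.drop (i + 1))))
  else props

def extract_props (vevent_text : String) : List (String × String) :=
  ((pvUnfold (PySem.Chars.splitlines vevent_text.toList)).foldl pvStepA PySem.Dict.empty).items

-- ===== PORT B =====

-- flush(line): i = line.find(':'); skip if i < 0; else parse and insert if the key is new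
def pvFlushB (props : PySem.Dict String String) (line : List Char) : PySem.Dict String String :=
  let i := PySem.Chars.find line [':']
  if i < 0 then props
  else
    let key := String.ofList (PySem.Chars.upper (PySem.Chars.strip
      ((PySem.Chars.splitOn (line.take i.toNat) [';']).headD [])))
    if props.contains key then props
    else props.insert key (String.ofList (PySem.Chars.strip (line.drop (i.toNat + 1))))

-- the streaming for-loop with the logical-line buffer, plus the final flush
def pvGoB (props : PySem.Dict String String) (buf : Option (List Char)) :
    List (List Char) → PySem.Dict String String
  | [] =>
    match buf with
    | none => props
    | some b => pvFlushB props b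
  | raw :: rest =>
    match buf with
    | some b =>
      if pvCont raw then pvGoB props (some (b ++ raw.drop 1)) rest
      else pvGoB (pvFlushB props b) (some raw) rest
    | none => pvGoB props (some raw) rest

def extract_props_alt (vevent_text : String) : List (String × String) :=
  (pvGoB PySem.Dict.empty none (PySem.Chars.splitlines vevent_text.toList)).items

-- ===== PRECONDITION & SPEC =====
def Spec_extract_props (vevent_text : String) (out : List (String × String)) : Prop := out = extract_props_alt vevent_text
instance (vevent_text : String) (out : List (String × String)) : Decidable (Spec_extract_props vevent_text out) := by unfold Spec_extract_props; infer_instance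

-- ===== CLAIM (what is proved, stated in full; the proofs are below) =====
def Claim_equal_extract_props : Prop := ∀ (vevent_text : String), Dom_extract_props vevent_text → Spec_extract_props vevent_text (extract_props vevent_text)

-- ===== LEMMAS AND PROOFS =====

-- B's flush parses a line exactly as A's loop body does (':' absent ↔ find = -1)
theorem pvFlushB_eq_stepA (props : PySem.Dict String String) (line : List Char) :
    pvFlushB props line = pvStepA props line := by
  by_cases h : PySem.Chars.isIn [':'] line = true
  · have h0 : (0 : Int) ≤ PySem.Chars.find line [':'] :=
      (PySem.Chars.find_nonneg_iff line [':']).mpr ((PySem.Chars.isIn_iff_infix (sub := [':']) (s := line)).mp h)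
    simp [pvFlushB, pvStepA, h, not_lt.mpr h0]
  · have h1 : PySem.Chars.find line [':'] = -1 :=
      (PySem.Chars.find_eq_neg_one_iff line [':']).mpr
        ((PySem.Chars.isIn_eq_false_iff (sub := [':']) (s := line)).mp (eq_false_of_ne_true h))
    simp [pvFlushB, pvStepA, h, h1]

-- recursive characterisation of unfold_lines from a current logical line
def pvU1 (cur : List Char) : List (List Char) → List (List Char)
  | [] => [cur]
  | r :: rest => if pvCont r then pvU1 (cur ++ r.drop 1) rest else cur :: pvU1 r rest

theorem pvAppendLast_append (acc : List (List Char)) (cur s : List Char) :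
    pvAppendLast (acc ++ [cur]) s = acc ++ [cur ++ s] := by
  induction acc with
  | nil => simp [pvAppendLast]
  | cons a as ih => cases as <;> simp_all [pvAppendLast]

theorem pvUnfold_foldl (ls : List (List Char)) :
    ∀ (acc : List (List Char)) (cur : List Char),
      List.foldl pvStepU (acc ++ [cur]) ls = acc ++ pvU1 cur ls := by
  induction ls with
  | nil => intro acc cur; simp [pvU1]
  | cons r rest ih =>
    intro acc cur
    by_cases hc : pvCont r = true
    · have h1 : pvStepU (acc ++ [cur]) r = acc ++ [cur ++ r.drop 1] := by
        simp [pvStepU, hc, pvAppendLast_append]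
      rw [List.foldl_cons, h1, ih acc (cur ++ r.drop 1)]
      simp [pvU1, hc]
    · have h1 : pvStepU (acc ++ [cur]) r = (acc ++ [cur]) ++ [r] := by
        simp [pvStepU, hc]
      rw [List.foldl_cons, h1, ih (acc ++ [cur]) r]
      simp [pvU1, hc]

theorem pvGoB_some (ls : List (List Char)) :
    ∀ (props : PySem.Dict String String) (cur : List Char),
      pvGoB props (some cur) ls = List.foldl pvStepA props (pvU1 cur ls) := by
  induction ls with
  | nil => intro props cur; simp [pvGoB, pvU1, pvFlushB_eq_stepA]
  | cons r rest ih =>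
    intro props cur
    by_cases hc : pvCont r = true
    · simp [pvGoB, pvU1, hc, ih]
    · simp [pvGoB, pvU1, hc, ih, pvFlushB_eq_stepA]

theorem pvMain (ls : List (List Char)) :
    (pvUnfold ls).foldl pvStepA PySem.Dict.empty = pvGoB PySem.Dict.empty none ls := by
  cases ls with
  | nil => simp [pvUnfold, pvGoB]
  | cons r rest =>
    have hstep : pvStepU [] r = [r] := by
      simp [pvStepU]
    have hU : pvUnfold (r :: rest) = pvU1 r rest := by
      unfold pvUnfold
      rw [List.foldl_cons, hstep]
      simpa using pvUnfold_foldl rest [] r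
    rw [hU, pvGoB, ← pvGoB_some rest PySem.Dict.empty r]

-- ===== VERDICT (by name: the statement is the Claim_ definition above) =====
theorem extract_props_spec : Claim_equal_extract_props := by
  intro v _
  unfold Spec_extract_props extract_props extract_props_alt
  rw [pvMain]
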